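-- pv_equiv track=rewrite | github.com/gerliron18/67101-Introduction-to-Computer-Science | Ex7/ex7.py | no_repetition_sequences_list
-- ===== SOURCE A (Python) =====
-- def no_repetition_sequences_list_with_prefix(prefix, char_list, n):
--     """A function that generate all possible combinations of words
--     in length n by given prefix and given char_list.
--     Will return list of strings"""
--     temp_list = []  # Define temporary list
--     if len(prefix) == n - 1:  # Check if the given prefix is almost in length n
--         for letter in char_list:  # Run along all letters in char_list
--             if letter not in prefix:  # Check if the letter is in the prefix
--                 temp_list.append((prefix + letter))
--                 # Add the prefix eith the letter to the temporary list
--         return temp_list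
--     for letter in char_list:  # Run along all letters in char_list
--         if letter not in prefix:  # Check if the letter is in the prefix
--             temp_list.extend(
--                 no_repetition_sequences_list_with_prefix(prefix + letter,
--                                                          char_list, n))
--             # Extend the temporary list by recursive
--             # call to generate combination
--     return temp_list
--
-- def no_repetition_sequences_list(char_list, n):
--     """A function that return a list of strings of all possible
--     combinations by given char_list and given length n with no repetitions"""
--     final_list = []  # Define final list
--     if n == 0:  # Check if the given length equal 0
--         return [""]
--     elif n == 1:  # Check if the given length equal 1
--         for letter in char_list:  # Run along all letters in char_list
--             final_list.append(letter)
--             # Append the final list the checked letter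
--         return final_list
--     for letter in char_list:
--         # If length n is greater then 1, reun along
--         # all the letters in char_list
--         final_list.extend(
--             no_repetition_sequences_list_with_prefix(letter, char_list, n))
--         # Extend the temporary list by calling to previous
--         # function to generate combinations
--     return final_list
-- ===== SOURCE B (Python) =====
-- def no_repetition_sequences_list(char_list, n):
--     """Iterative re-implementation: one explicit-stack DFS loop replaces the
--     recursive helper/wrapper pair; same outputs in the same order."""
--     if n == 0:
--         return [""]
--     if n == 1:
--         return list(char_list)
--     out = []
--     stack = list(char_list)
--     while stack:
--         prefix = stack.pop(0)
--         if len(prefix) == n - 1: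
--             out.extend(prefix + letter for letter in char_list
--                        if letter not in prefix)
--         else:
--             stack = [prefix + letter for letter in char_list
--                      if letter not in prefix] + stack
--     return out
-- ===== Notes on version B (the rewrite author's own statement) =====
-- stated objective: alternative
-- what changed: Replaces the recursive helper/wrapper pair by a single iterative depth-first loop over an explicit stack of prefixes (plus direct returns for n==0 and n==1), producing the same sequences in the same order.
import Mathlib
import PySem

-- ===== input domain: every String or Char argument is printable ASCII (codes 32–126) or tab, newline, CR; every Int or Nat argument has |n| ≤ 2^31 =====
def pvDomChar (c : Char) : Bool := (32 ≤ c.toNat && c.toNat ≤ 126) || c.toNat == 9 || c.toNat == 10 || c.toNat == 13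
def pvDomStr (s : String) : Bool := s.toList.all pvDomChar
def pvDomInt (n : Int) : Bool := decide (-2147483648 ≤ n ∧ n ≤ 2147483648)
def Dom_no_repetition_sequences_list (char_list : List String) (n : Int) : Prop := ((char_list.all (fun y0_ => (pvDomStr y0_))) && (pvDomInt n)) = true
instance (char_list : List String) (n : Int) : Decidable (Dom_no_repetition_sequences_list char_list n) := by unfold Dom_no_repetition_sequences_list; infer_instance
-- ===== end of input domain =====

-- B replaces the recursive helper/wrapper pair by one iterative explicit-stack DFS loop; same value, same order (objective: alternative).
-- Python 'letter not in prefix' is the SUBSTRING test (PySem.Str.isIn); both programs terminate on every input (each extension step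
-- strictly shrinks the set of list elements that are not yet substrings of the prefix), so no Pre_ is needed.

-- Termination measure shared by both ports: how many elements of char_list are not yet substrings of the prefix.
def pvM (char_list : List String) (p : String) : Nat :=
  (char_list.filter (fun l => !PySem.Str.isIn l p)).length

theorem isIn_mono (a p l : String) (h : PySem.Str.isIn a p = true) :
    PySem.Str.isIn a (p ++ l) = true := by
  rw [PySem.Str.isIn_iff_infix] at h ⊢
  rw [String.toList_append]
  exact h.trans ⟨[], l.toList, by simp⟩

theorem isIn_self_append (p l : String) : PySem.Str.isIn l (p ++ l) = true := by
  rw [PySem.Str.isIn_iff_infix, String.toList_append]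
  exact ⟨p.toList, [], by simp⟩

theorem pvM_lt (char_list : List String) (p l : String)
    (hl : l ∈ char_list) (h : PySem.Str.isIn l p = false) :
    pvM char_list (p ++ l) < pvM char_list p := by
  have hmono : ∀ a : String, (!PySem.Str.isIn a (p ++ l)) = true → (!PySem.Str.isIn a p) = true := by
    intro a ha
    rw [Bool.not_eq_true'] at ha ⊢
    by_contra hap
    rw [Bool.not_eq_false] at hap
    rw [isIn_mono a p l hap] at ha
    simp at ha
  have hsub := List.monotone_filter_right char_list hmono
  refine lt_of_le_of_ne hsub.length_le ?_
  intro heq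
  have heqL := hsub.eq_of_length heq
  have hmem : l ∈ char_list.filter (fun a => !PySem.Str.isIn a p) :=
    List.mem_filter.2 ⟨hl, by rw [h]; rfl⟩
  rw [← heqL] at hmem
  have h2 := (List.mem_filter.1 hmem).2
  rw [isIn_self_append p l] at h2
  simp at h2

-- ===== PORT A =====
-- Transliteration of no_repetition_sequences_list_with_prefix: the append/extend loops over char_list
-- become filter+map / filter+flatMap over char_list ('.attach' only carries the membership fact needed
-- for the termination proof; the computed list is the same).
def nrswp (pfx : String) (char_list : List String) (n : Int) : List String :=
  if PySem.Str.len pfx = n - 1 then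
    (char_list.filter (fun letter => !PySem.Str.isIn letter pfx)).map (fun letter => pfx ++ letter)
  else
    (char_list.filter (fun letter => !PySem.Str.isIn letter pfx)).attach.flatMap
      (fun x => nrswp (pfx ++ x.1) char_list n)
termination_by pvM char_list pfx
decreasing_by
  have hx := x.2
  rw [List.mem_filter] at hx
  exact pvM_lt char_list pfx x.1 hx.1 (by simpa using hx.2)

def no_repetition_sequences_list (char_list : List String) (n : Int) : List String :=
  if n = 0 then [""]
  else if n = 1 then char_list.foldl (fun final_list letter => final_list ++ [letter]) []
  else char_list.foldl (fun final_list letter => final_list ++ nrswp letter char_list n) []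

theorem pvSum_filter_attach {a : Type} (xs : List a) (p : a -> Bool) (f : a -> Nat) :
    (List.map f (List.filter (fun x : {x // x ∈ xs} => p ↑x) xs.attach).unattach).sum
    = (List.map f (xs.filter p)).sum := by
  simp [List.unattach_filter]

-- ===== PORT B =====
-- Transliteration of Source B's while-loop: stack.pop(0) is the head, the children comprehension is
-- filter+map prepended to the stack.
def nrsLoop (char_list : List String) (n : Int) (stack : List String) (out : List String) : List String :=
  match stack with
  | [] => out
  | pfx :: rest =>
    if PySem.Str.len pfx = n - 1 then
      nrsLoop char_list n rest
        (out ++ (char_list.filter (fun letter => !PySem.Str.isIn letter pfx)).map (fun letter => pfx ++ letter))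
    else
      nrsLoop char_list n
        ((char_list.filter (fun letter => !PySem.Str.isIn letter pfx)).map (fun letter => pfx ++ letter) ++ rest)
        out
termination_by (stack.map (fun p => (pvM char_list p + 1).factorial)).sum
decreasing_by
  · simp only [List.map_cons, List.sum_cons]
    have := Nat.factorial_pos (pvM char_list pfx + 1)
    omega
  · simp only [List.map_cons, List.sum_cons, List.map_append, List.sum_append, List.map_map]
    have hbound : ((char_list.filter (fun letter => !PySem.Str.isIn letter pfx)).map
        (fun l => (pvM char_list (pfx ++ l) + 1).factorial)).sum
        ≤ (pvM char_list pfx) * (pvM char_list pfx).factorial := by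
      have h1 : ∀ x ∈ (char_list.filter (fun letter => !PySem.Str.isIn letter pfx)).map
          (fun l => (pvM char_list (pfx ++ l) + 1).factorial),
          x ≤ (pvM char_list pfx).factorial := by
        intro x hx
        rw [List.mem_map] at hx
        obtain ⟨l, hl, rfl⟩ := hx
        rw [List.mem_filter] at hl
        have hlt := pvM_lt char_list pfx l hl.1 (by simpa using hl.2)
        exact Nat.factorial_le (by omega)
      calc ((char_list.filter (fun letter => !PySem.Str.isIn letter pfx)).map
              (fun l => (pvM char_list (pfx ++ l) + 1).factorial)).sum
          ≤ ((char_list.filter (fun letter => !PySem.Str.isIn letter pfx)).map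
              (fun l => (pvM char_list (pfx ++ l) + 1).factorial)).length
              * (pvM char_list pfx).factorial := by
            exact List.sum_le_card_nsmul _ _ h1
        _ = (pvM char_list pfx) * (pvM char_list pfx).factorial := by
            rw [List.length_map]; rfl
    have hfac : (pvM char_list pfx) * (pvM char_list pfx).factorial
        < (pvM char_list pfx + 1).factorial := by
      rw [Nat.factorial_succ]
      have := Nat.factorial_pos (pvM char_list pfx)
      exact Nat.mul_lt_mul_of_lt_of_le (Nat.lt_succ_self _) (le_refl _) this
    have hlt : ((char_list.filter (fun letter => !PySem.Str.isIn letter pfx)).map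
        (fun l => (pvM char_list (pfx ++ l) + 1).factorial)).sum
        < (pvM char_list pfx + 1).factorial := lt_of_le_of_lt hbound hfac
    have hsame : (List.map ((fun p => (pvM char_list p + 1).factorial) ∘ fun x : {x // x ∈ char_list} => pfx ++ ↑x)
        (List.filter (fun x : {x // x ∈ char_list} => !PySem.Str.isIn (↑x) pfx) char_list.attach)).sum
        = ((char_list.filter (fun letter => !PySem.Str.isIn letter pfx)).map
            (fun l => (pvM char_list (pfx ++ l) + 1).factorial)).sum := by
      simp [Function.comp]
      exact pvSum_filter_attach char_list (fun y => !PySem.Chars.isIn y.toList pfx.toList)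
        (fun x => (pvM char_list (pfx ++ x) + 1).factorial)
    rw [hsame]
    omega

def no_repetition_sequences_list_alt (char_list : List String) (n : Int) : List String :=
  if n = 0 then [""]
  else if n = 1 then char_list
  else nrsLoop char_list n char_list []

-- ===== PRECONDITION & SPEC =====
def Spec_no_repetition_sequences_list (char_list : List String) (n : Int) (out : List String) : Prop := out = no_repetition_sequences_list_alt char_list n
instance (char_list : List String) (n : Int) (out : List String) : Decidable (Spec_no_repetition_sequences_list char_list n out) := by unfold Spec_no_repetition_sequences_list; infer_instance

-- ===== CLAIM (what is proved, stated in full; the proofs are below) =====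
def Claim_equal_no_repetition_sequences_list : Prop := ∀ (char_list : List String) (n : Int), Dom_no_repetition_sequences_list char_list n → Spec_no_repetition_sequences_list char_list n (no_repetition_sequences_list char_list n)

-- ===== LEMMAS AND PROOFS =====

theorem foldl_append_f {α β : Type} (f : α → List β) :
    ∀ (xs : List α) (acc : List β),
      xs.foldl (fun a x => a ++ f x) acc = acc ++ xs.flatMap f := by
  intro xs
  induction xs with
  | nil => intro acc; simp
  | cons x t ih => intro acc; simp [ih, List.append_assoc]

theorem attach_flatMap_eq {α β : Type} (xs : List α) (f : α → List β) :
    xs.attach.flatMap (fun x => f x.1) = xs.flatMap f := by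
  conv_rhs => rw [← List.attach_map_subtype_val xs]
  rw [List.flatMap_map]

theorem pvMap_filter_attach {a b : Type} (xs : List a) (p : a → Bool) (f : a → b) :
    List.map (fun x : {x // x ∈ xs} => f ↑x) (List.filter (fun x : {x // x ∈ xs} => p ↑x) xs.attach)
    = List.map f (xs.filter p) := by
  rw [List.filter_attach]
  simp [List.map_map, Function.comp]

theorem nrswp_base (pfx : String) (char_list : List String) (n : Int)
    (h : PySem.Str.len pfx = n - 1) :
    nrswp pfx char_list n
    = (char_list.filter (fun l => !PySem.Str.isIn l pfx)).map (fun l => pfx ++ l) := by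
  rw [nrswp, if_pos h]

theorem nrswp_rec (pfx : String) (char_list : List String) (n : Int)
    (h : ¬ PySem.Str.len pfx = n - 1) :
    nrswp pfx char_list n
    = (char_list.filter (fun l => !PySem.Str.isIn l pfx)).flatMap
        (fun l => nrswp (pfx ++ l) char_list n) := by
  rw [nrswp, if_neg h]
  exact attach_flatMap_eq (char_list.filter (fun l => !PySem.Str.isIn l pfx))
    (fun l => nrswp (pfx ++ l) char_list n)

theorem nrsLoop_eq (char_list : List String) (n : Int) :
    ∀ (stack out : List String),
      nrsLoop char_list n stack out = out ++ stack.flatMap (fun p => nrswp p char_list n) := by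
  intro stack out
  induction stack, out using nrsLoop.induct char_list n with
  | case1 out => simp [nrsLoop]
  | case2 out pfx rest h ih =>
      have ih' : nrsLoop char_list n rest
          (out ++ List.map (fun x : {x // x ∈ char_list} => pfx ++ ↑x)
            (List.filter (fun x : {x // x ∈ char_list} => !PySem.Str.isIn (↑x) pfx) char_list.attach))
          = out ++ List.map (fun x : {x // x ∈ char_list} => pfx ++ ↑x)
              (List.filter (fun x : {x // x ∈ char_list} => !PySem.Str.isIn (↑x) pfx) char_list.attach)
            ++ List.flatMap (fun p => nrswp p char_list n) rest := ih
      rw [pvMap_filter_attach char_list (fun l => !PySem.Str.isIn l pfx) (fun l => pfx ++ l)] at ih'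
      rw [nrsLoop, if_pos h, ih', List.flatMap_cons, nrswp_base pfx char_list n h,
        List.append_assoc]
  | case3 out pfx rest h ih =>
      have ih' : nrsLoop char_list n
          (List.map (fun x : {x // x ∈ char_list} => pfx ++ ↑x)
            (List.filter (fun x : {x // x ∈ char_list} => !PySem.Str.isIn (↑x) pfx) char_list.attach)
            ++ rest) out
          = out ++ List.flatMap (fun p => nrswp p char_list n)
              (List.map (fun x : {x // x ∈ char_list} => pfx ++ ↑x)
                (List.filter (fun x : {x // x ∈ char_list} => !PySem.Str.isIn (↑x) pfx) char_list.attach)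
                ++ rest) := ih
      rw [pvMap_filter_attach char_list (fun l => !PySem.Str.isIn l pfx) (fun l => pfx ++ l)] at ih'
      rw [nrsLoop, if_neg h, ih', List.flatMap_append, List.flatMap_cons,
        nrswp_rec pfx char_list n h, List.flatMap_map]

-- ===== VERDICT (by name: the statement is the Claim_ definition above) =====
theorem no_repetition_sequences_list_spec : Claim_equal_no_repetition_sequences_list := by
  intro char_list n _
  unfold Spec_no_repetition_sequences_list
  unfold no_repetition_sequences_list no_repetition_sequences_list_alt
  by_cases h0 : n = 0
  · simp [h0]
  · by_cases h1 : n = 1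
    · simp [h1, foldl_append_f (fun l => [l])]
    · simp only [if_neg h0, if_neg h1]
      rw [foldl_append_f (fun l => nrswp l char_list n), nrsLoop_eq]
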